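-- pv_equiv track=rewrite | github.com/click2niveta/usaco_code | moo_operations.py | solve
-- ===== SOURCE A (Python) =====
-- def solve(s):
--     for i in range(len(s) - 2):
--         if s[i:i+3] == 'MOO':
--             return len(s) - 3
--     for i in range(len(s) - 2):
--         if s[i:i+3] == 'OOO':
--             return len(s) - 3 + 1
--         if s[i:i+3] == 'MOM':
--             return len(s) - 3 + 1
--     for i in range(len(s) - 2):
--         if s[i:i+3] == 'OOM':
--             return len(s) - 3 + 2
--     return -1
-- ===== SOURCE B (Python) =====
-- def solve(s):
--     SCORE = {'MOO': 0, 'OOO': 1, 'MOM': 1, 'OOM': 2}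
--     best = 3
--     for t in zip(s, s[1:], s[2:]):
--         best = min(best, SCORE.get(''.join(t), 3))
--     return len(s) - 3 + best if best < 3 else -1
-- ===== Notes on version B (the rewrite author's own statement) =====
-- stated objective: alternative
-- what changed: B is a single left-to-right pass over character triples (zip of s with its shifts) folding a minimum penalty (MOO=0, OOO/MOM=1, OOM=2, miss=3) into an accumulator and converting the minimum to the answer arithmetically, instead of A's three staged rescans with early returns.
import Mathlib
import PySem

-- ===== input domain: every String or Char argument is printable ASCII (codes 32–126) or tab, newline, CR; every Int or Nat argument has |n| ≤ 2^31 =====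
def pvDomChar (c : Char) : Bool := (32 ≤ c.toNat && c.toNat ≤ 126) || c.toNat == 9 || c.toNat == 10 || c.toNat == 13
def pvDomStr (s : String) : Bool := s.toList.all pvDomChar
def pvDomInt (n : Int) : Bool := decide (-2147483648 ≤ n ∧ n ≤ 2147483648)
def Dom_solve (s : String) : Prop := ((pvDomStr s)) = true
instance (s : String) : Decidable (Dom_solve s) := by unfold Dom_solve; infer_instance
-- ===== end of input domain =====

-- B replaces A's three staged pattern rescans with early returns by ONE pass folding a minimum
-- penalty over the character triples of s (alternative decomposition, same cost).

-- ===== PORT A =====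
def solve (s : String) : Int :=
  let l := s.toList
  let n : Int := (l.length : Int)
  match (PySem.List.pyRange 0 (n - 2) 1).findSome? (fun i =>
      if PySem.List.slice l (some i) (some (i + 3)) = "MOO".toList then some (n - 3) else none) with
  | some r => r
  | none =>
    match (PySem.List.pyRange 0 (n - 2) 1).findSome? (fun i =>
        if PySem.List.slice l (some i) (some (i + 3)) = "OOO".toList then some (n - 3 + 1)
        else if PySem.List.slice l (some i) (some (i + 3)) = "MOM".toList then some (n - 3 + 1)
        else none) with
    | some r => r
    | none =>
      match (PySem.List.pyRange 0 (n - 2) 1).findSome? (fun i =>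
          if PySem.List.slice l (some i) (some (i + 3)) = "OOM".toList then some (n - 3 + 2) else none) with
      | some r => r
      | none => -1

-- ===== PORT B =====
-- the SCORE dict of Source B; keys are the ''.join of a 3-tuple of chars, i.e. 3-char strings, as List Char
def solveScore : PySem.Dict (List Char) Int :=
  PySem.Dict.ofList [("MOO".toList, 0), ("OOO".toList, 1), ("MOM".toList, 1), ("OOM".toList, 2)]

def solve_alt (s : String) : Int :=
  let l := s.toList
  -- zip(s, s[1:], s[2:]) as nested pairs; ''.join(t) is the three chars as a list
  let triples := l.zip ((l.drop 1).zip (l.drop 2))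
  let best := triples.foldl
    (fun b t => min b (PySem.Dict.getD solveScore [t.1, t.2.1, t.2.2] 3)) 3
  if best < 3 then (l.length : Int) - 3 + best else -1

-- ===== PRECONDITION & SPEC =====
def Spec_solve (s : String) (out : Int) : Prop := out = solve_alt s
instance (s : String) (out : Int) : Decidable (Spec_solve s out) := by unfold Spec_solve; infer_instance

-- ===== CLAIM (what is proved, stated in full; the proofs are below) =====
def Claim_equal_solve : Prop := ∀ (s : String), Dom_solve s → Spec_solve s (solve s)

-- ===== LEMMAS AND PROOFS =====

-- the window list both programs effectively traverse
def pvWins (l : List Char) : List (List Char) :=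
  (l.zip ((l.drop 1).zip (l.drop 2))).map (fun t => [t.1, t.2.1, t.2.2])

-- the per-window score Source B looks up
def pvG (w : List Char) : Int := PySem.Dict.getD solveScore w 3

theorem pvG_eval (w : List Char) :
    pvG w = if w = "MOO".toList then 0 else if w = "OOO".toList then 1
      else if w = "MOM".toList then 1 else if w = "OOM".toList then 2 else 3 := by
  have h : solveScore.items
      = [("MOO".toList, (0:Int)), ("OOO".toList, 1), ("MOM".toList, 1), ("OOM".toList, 2)] := by
    decide
  unfold pvG
  simp only [show ("MOO".toList : List Char) = ['M','O','O'] from by decide,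
    show ("OOO".toList : List Char) = ['O','O','O'] from by decide,
    show ("MOM".toList : List Char) = ['M','O','M'] from by decide,
    show ("OOM".toList : List Char) = ['O','O','M'] from by decide] at h ⊢
  simp only [PySem.Dict.getD, PySem.Dict.get?, h, List.find?]
  by_cases h1 : w = ['M','O','O']
  · subst h1; decide
  by_cases h2 : w = ['O','O','O']
  · subst h2; decide
  by_cases h3 : w = ['M','O','M']
  · subst h3; decide
  by_cases h4 : w = ['O','O','M']
  · subst h4; decide
  rw [beq_eq_false_iff_ne.mpr (Ne.symm h1), beq_eq_false_iff_ne.mpr (Ne.symm h2),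
      beq_eq_false_iff_ne.mpr (Ne.symm h3), beq_eq_false_iff_ne.mpr (Ne.symm h4)]
  simp [h1, h2, h3, h4]

-- the priority-membership value the min-fold computes
def pvBest (ws : List (List Char)) : Int :=
  if "MOO".toList ∈ ws then 0
  else if "OOO".toList ∈ ws ∨ "MOM".toList ∈ ws then 1
  else if "OOM".toList ∈ ws then 2 else 3

theorem pvBest_cons (w : List Char) (ws : List (List Char)) :
    pvBest (w :: ws) = min (pvG w) (pvBest ws) := by
  rw [pvG_eval]
  unfold pvBest
  simp only [show ("MOO".toList : List Char) = ['M','O','O'] from by decide,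
    show ("OOO".toList : List Char) = ['O','O','O'] from by decide,
    show ("MOM".toList : List Char) = ['M','O','M'] from by decide,
    show ("OOM".toList : List Char) = ['O','O','M'] from by decide]
  have hm : ∀ (p : List Char), (p ∈ w :: ws) = (w = p ∨ p ∈ ws) := by
    intro p; simp [List.mem_cons, eq_comm]
  simp only [hm]
  by_cases h1 : w = ['M','O','O'] <;>
    by_cases h2 : w = ['O','O','O'] <;>
      by_cases h3 : w = ['M','O','M'] <;>
        by_cases h4 : w = ['O','O','M'] <;>
          simp [h1, h2, h3, h4] <;>
          split_ifs <;> omega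

theorem pvFold_eq_min_best (ws : List (List Char)) (c : Int) (hc : c ≤ 3) :
    ws.foldl (fun b t => min b (pvG t)) c = min c (pvBest ws) := by
  induction ws generalizing c with
  | nil =>
    unfold pvBest; simp; omega
  | cons w ws ih =>
    rw [List.foldl_cons, ih (min c (pvG w)) (le_trans (min_le_left _ _) hc), pvBest_cons]
    omega

theorem findSome?_ite_const {α β : Type} (r : List α) (P : α → Prop) [DecidablePred P] (c : β) :
    r.findSome? (fun i => if P i then some c else none)
      = if (∃ i ∈ r, P i) then some c else none := by
  induction r with
  | nil => simp [List.findSome?]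
  | cons a t ih =>
    by_cases h : P a <;> simp [List.findSome?, h, ih]

theorem findSome?_ite2_const {α β : Type} (r : List α) (P Q : α → Prop) [DecidablePred P] [DecidablePred Q] (c : β) :
    r.findSome? (fun i => if P i then some c else if Q i then some c else none)
      = if (∃ i ∈ r, P i ∨ Q i) then some c else none := by
  induction r with
  | nil => simp [List.findSome?]
  | cons a t ih =>
    by_cases hp : P a
    · simp [List.findSome?, hp]
    · by_cases hq : Q a <;> simp [List.findSome?, hp, hq, ih]

-- the windows as take-3-of-drop over List.range
theorem wins_eq_range (l : List Char) :
    (List.range (l.length - 2)).map (fun j => (l.drop j).take 3) = pvWins l := by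
  induction l with
  | nil => simp [pvWins]
  | cons a t ih =>
    match t with
    | [] => simp [pvWins]
    | [b] => simp [pvWins]
    | b :: c :: t' =>
      have hlen : (a :: b :: c :: t').length - 2 = t'.length + 1 := by simp
      rw [hlen, List.range_succ_eq_map, List.map_cons, List.map_map]
      have htail : ((fun j => List.take 3 (List.drop j (a::b::c::t'))) ∘ Nat.succ)
          = fun j => List.take 3 (List.drop j (b::c::t')) := by
        funext j; simp
      rw [htail]
      have hlen2 : (b::c::t').length - 2 = t'.length := by simp
      rw [hlen2] at ih
      rw [ih]
      simp [pvWins]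

-- the slices A scans are exactly the windows B folds over
theorem slices_eq_wins (l : List Char) :
    (PySem.List.pyRange 0 ((l.length : Int) - 2) 1).map
      (fun i => PySem.List.slice l (some i) (some (i + 3))) = pvWins l := by
  rcases l with _ | ⟨a, _ | ⟨b, t⟩⟩
  · decide
  · have h1 : (([a] : List Char).length : Int) - 2 = -1 := by simp
    rw [h1, show PySem.List.pyRange 0 (-1) 1 = [] from by decide]
    simp [pvWins]
  · have h2 : ((a :: b :: t).length : Int) - 2 = (((a :: b :: t).length - 2 : Nat) : Int) := by
      simp; omega
    rw [h2, PySem.List.pyRange_zero_natCast, List.map_map]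
    rw [← wins_eq_range (a :: b :: t)]
    apply List.map_congr_left
    intro j _
    have h3 := PySem.List.slice_natCast_add (a :: b :: t) j 3
    push_cast at h3 ⊢
    exact h3

-- ===== VERDICT (by name: the statement is the Claim_ definition above) =====
set_option maxHeartbeats 1000000 in
theorem solve_spec : Claim_equal_solve := by
  intro s _
  unfold Spec_solve solve solve_alt
  dsimp only
  set l := s.toList with hl
  set n : Int := (l.length : Int) with hn
  set r := PySem.List.pyRange 0 (n - 2) 1 with hr
  set f : Int → List Char := fun i => PySem.List.slice l (some i) (some (i + 3)) with hf
  rw [findSome?_ite_const r (fun i => f i = "MOO".toList) (n - 3),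
      findSome?_ite2_const r (fun i => f i = "OOO".toList) (fun i => f i = "MOM".toList) (n - 3 + 1),
      findSome?_ite_const r (fun i => f i = "OOM".toList) (n - 3 + 2)]
  have hmap : r.map f = pvWins l := by rw [hr, hn, hf]; exact slices_eq_wins l
  have hmem : ∀ (p : List Char), (∃ i ∈ r, f i = p) ↔ p ∈ pvWins l := by
    intro p; rw [← hmap, List.mem_map]
  have hfold : (l.zip ((l.drop 1).zip (l.drop 2))).foldl
      (fun b t => min b (PySem.Dict.getD solveScore [t.1, t.2.1, t.2.2] 3)) 3
        = pvBest (pvWins l) := by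
    have : (l.zip ((l.drop 1).zip (l.drop 2))).foldl
        (fun b t => min b (PySem.Dict.getD solveScore [t.1, t.2.1, t.2.2] 3)) 3
          = (pvWins l).foldl (fun b w => min b (pvG w)) 3 := by
      unfold pvWins pvG
      rw [List.foldl_map]
    rw [this, pvFold_eq_min_best _ _ (by omega)]
    unfold pvBest
    split_ifs <;> omega
  have hsplit : (∃ i ∈ r, f i = "OOO".toList ∨ f i = "MOM".toList)
      ↔ ("OOO".toList ∈ pvWins l ∨ "MOM".toList ∈ pvWins l) := by
    rw [← hmem, ← hmem]
    constructor
    · rintro ⟨i, hi, h | h⟩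
      exacts [Or.inl ⟨i, hi, h⟩, Or.inr ⟨i, hi, h⟩]
    · rintro (⟨i, hi, h⟩ | ⟨i, hi, h⟩)
      exacts [⟨i, hi, Or.inl h⟩, ⟨i, hi, Or.inr h⟩]
  rw [hfold]
  unfold pvBest
  simp only [hmem, hsplit]
  by_cases h1 : "MOO".toList ∈ pvWins l <;>
    by_cases h2 : "OOO".toList ∈ pvWins l <;>
      by_cases h3 : "MOM".toList ∈ pvWins l <;>
        by_cases h4 : "OOM".toList ∈ pvWins l <;>
          simp only [h1, h2, h3, h4, or_true, or_self, or_false, not_false_iff, if_pos,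
            if_neg] <;>
          norm_num
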